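-- pv_equiv track=rewrite | github.com/aiseungjun/FDK-OPT-R | peak_sigma_estimate.py | _group_range
-- ===== SOURCE A (Python) =====
-- from typing import Any
--
-- def _group_range(rows: list[tuple[str, int, Any]]) -> dict[str, dict[str, int]]:
--     out: dict[str, dict[str, int]] = {}
--     for group_id, frame_idx, _ref in rows:
--         bucket = out.setdefault(
--             group_id, {"min": frame_idx, "max": frame_idx, "count": 0}
--         )
--         bucket["min"] = min(bucket["min"], frame_idx)
--         bucket["max"] = max(bucket["max"], frame_idx)
--         bucket["count"] += 1
--     return out
-- ===== SOURCE B (Python) =====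
-- def _group_range(rows):
--     groups = {}
--     for group_id, frame_idx, _ref in rows:
--         groups.setdefault(group_id, []).append(frame_idx)
--     return {
--         g: {"min": min(vals), "max": max(vals), "count": len(vals)}
--         for g, vals in groups.items()
--     }
-- ===== Notes on version B (the rewrite author's own statement) =====
-- stated objective: alternative
-- what changed: B first groups the frame indices per group id into lists in one pass, then derives min/max/count of each list with the built-in reductions, instead of A's single pass maintaining online min/max/count buckets.
import Mathlib
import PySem

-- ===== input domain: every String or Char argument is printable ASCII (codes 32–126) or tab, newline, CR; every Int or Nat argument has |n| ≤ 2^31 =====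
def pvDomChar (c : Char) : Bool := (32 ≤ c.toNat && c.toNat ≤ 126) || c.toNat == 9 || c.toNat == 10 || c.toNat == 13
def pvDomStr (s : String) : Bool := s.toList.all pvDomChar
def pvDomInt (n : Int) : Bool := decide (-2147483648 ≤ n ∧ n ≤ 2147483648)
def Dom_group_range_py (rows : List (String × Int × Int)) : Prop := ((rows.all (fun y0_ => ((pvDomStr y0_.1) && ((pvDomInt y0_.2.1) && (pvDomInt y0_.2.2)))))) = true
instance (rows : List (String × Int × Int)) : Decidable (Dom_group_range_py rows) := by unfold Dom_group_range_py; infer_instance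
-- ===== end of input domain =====

-- B replaces A's online min/max/count accumulation with a grouping pass into per-key lists
-- followed by built-in reductions over each list (alternative decomposition, same cost).

-- ===== PORT A =====
-- One loop over rows, maintaining a dict of {"min","max","count"} buckets updated online.
-- Python mutates the bucket obtained from setdefault in place; here we read it back and
-- re-insert (insert at an existing key keeps its position, so this is exact).
def group_range_py (rows : List (String × Int × Int)) : List (String × List (String × Int)) :=
  (rows.foldl (fun out row =>
      let g := row.1
      let f := row.2.1
      let out1 := out.setdefault g (PySem.Dict.ofList [("min", f), ("max", f), ("count", 0)])
      -- the key g is present after setdefault, so the getD default is never used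
      let bucket := (out1.get? g).getD (PySem.Dict.ofList [("min", f), ("max", f), ("count", 0)])
      let bucket := bucket.insert "min" (min (bucket.getD "min" 0) f)
      let bucket := bucket.insert "max" (max (bucket.getD "max" 0) f)
      let bucket := bucket.insert "count" (bucket.getD "count" 0 + 1)
      out1.insert g bucket)
    PySem.Dict.empty).items.map (fun p => (p.1, p.2.items))

-- ===== PORT B =====
-- First pass: group frame indices into per-key lists (groups.setdefault(g, []).append(f)).
-- Second pass: min(vals)/max(vals)/len(vals) for each group.
def group_range_py_alt (rows : List (String × Int × Int)) : List (String × List (String × Int)) :=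
  let groups := rows.foldl (fun d r => d.modify r.1 [] (fun l => l ++ [r.2.1])) PySem.Dict.empty
  groups.items.map (fun p =>
    (p.1, [("min", (PySem.List.min? p.2 (fun x => x)).getD 0),
           ("max", (PySem.List.max? p.2 (fun x => x)).getD 0),
           ("count", (p.2.length : Int))]))

-- ===== PRECONDITION & SPEC =====
def Spec_group_range_py (rows : List (String × Int × Int)) (out : List (String × List (String × Int))) : Prop := out = group_range_py_alt rows
instance (rows : List (String × Int × Int)) (out : List (String × List (String × Int))) : Decidable (Spec_group_range_py rows out) := by unfold Spec_group_range_py; infer_instance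

-- ===== CLAIM (what is proved, stated in full; the proofs are below) =====
def Claim_equal_group_range_py : Prop := ∀ (rows : List (String × Int × Int)), Dom_group_range_py rows → Spec_group_range_py rows (group_range_py rows)

-- ===== LEMMAS AND PROOFS =====

-- min/max of a nonempty list, as Python's min()/max() compute them
def minL : List Int → Int
  | [] => 0
  | x :: t => t.foldl min x

def maxL : List Int → Int
  | [] => 0
  | x :: t => t.foldl max x

-- the summary bucket A maintains for a group whose collected indices are `vals`
def summary (vals : List Int) : PySem.Dict String Int :=
  PySem.Dict.mk [("min", minL vals), ("max", maxL vals), ("count", (vals.length : Int))]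

def mapVals (d : PySem.Dict String (List Int)) : PySem.Dict String (PySem.Dict String Int) :=
  PySem.Dict.mk (d.items.map (fun p => (p.1, summary p.2)))

-- the two loop bodies, as named functions (definitionally the lambdas in the ports)
def stepA (out : PySem.Dict String (PySem.Dict String Int)) (row : String × Int × Int) :
    PySem.Dict String (PySem.Dict String Int) :=
  let g := row.1
  let f := row.2.1
  let out1 := out.setdefault g (PySem.Dict.ofList [("min", f), ("max", f), ("count", 0)])
  let bucket := (out1.get? g).getD (PySem.Dict.ofList [("min", f), ("max", f), ("count", 0)])
  let bucket := bucket.insert "min" (min (bucket.getD "min" 0) f)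
  let bucket := bucket.insert "max" (max (bucket.getD "max" 0) f)
  let bucket := bucket.insert "count" (bucket.getD "count" 0 + 1)
  out1.insert g bucket

def stepB (d : PySem.Dict String (List Int)) (r : String × Int × Int) :
    PySem.Dict String (List Int) :=
  d.modify r.1 [] (fun l => l ++ [r.2.1])

theorem mapVals_get? (d : PySem.Dict String (List Int)) (g : String) :
    (mapVals d).get? g = (d.get? g).map summary := by
  obtain ⟨l⟩ := d
  induction l with
  | nil => rfl
  | cons p t ih =>
      show (PySem.Dict.mk ((p.1, summary p.2) :: t.map _)).get? g = _
      rw [PySem.Dict.get?_mk_cons, PySem.Dict.get?_mk_cons]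
      by_cases h : (p.1 == g) = true
      · simp [h]
      · simp only [Bool.not_eq_true] at h
        simp only [h]
        exact ih

theorem mapVals_contains (d : PySem.Dict String (List Int)) (g : String) :
    (mapVals d).contains g = d.contains g := by
  rw [PySem.Dict.contains_eq_isSome_get?, PySem.Dict.contains_eq_isSome_get?, mapVals_get?]
  cases d.get? g <;> rfl

theorem mapVals_insert (d : PySem.Dict String (List Int)) (g : String) (w : List Int) :
    mapVals (d.insert g w) = (mapVals d).insert g (summary w) := by
  apply PySem.Dict.ext
  show (d.insert g w).items.map _ = ((mapVals d).insert g (summary w)).items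
  rw [PySem.Dict.items_insert, PySem.Dict.items_insert, mapVals_contains]
  by_cases h : d.contains g = true
  · simp only [h, if_true]
    show _ = (d.items.map _).map _
    rw [List.map_map, List.map_map]
    apply List.map_congr_left
    intro p _
    by_cases hp : (p.1 == g) = true
    · simp [Function.comp, hp]
    · simp only [Bool.not_eq_true] at hp
      simp [Function.comp, hp]
  · simp only [Bool.not_eq_true] at h
    simp only [h]
    show (d.items ++ [(g, w)]).map _ = (d.items.map _) ++ _
    rw [List.map_append]
    rfl

theorem summary_append (vals : List Int) (f : Int) (h : vals ≠ []) :
    summary (vals ++ [f]) =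
      PySem.Dict.mk [("min", min (minL vals) f), ("max", max (maxL vals) f),
                     ("count", (vals.length : Int) + 1)] := by
  obtain ⟨x, t, rfl⟩ := List.exists_cons_of_ne_nil h
  show PySem.Dict.mk [("min", minL (x :: (t ++ [f]))), ("max", maxL (x :: (t ++ [f]))),
        ("count", ((x :: (t ++ [f])).length : Int))] = _
  simp [minL, maxL, List.foldl_append]

theorem step_eq (d : PySem.Dict String (List Int))
    (hne : ∀ p ∈ d.items, p.2 ≠ []) (r : String × Int × Int) :
    stepA (mapVals d) r = mapVals (stepB d r) := by
  obtain ⟨g, f, x⟩ := r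
  show stepA (mapVals d) (g, f, x) = mapVals (d.insert g ((d.getD g []) ++ [f]))
  by_cases h : d.contains g = true
  · -- existing group
    obtain ⟨vals, hv⟩ : ∃ v, d.get? g = some v := by
      rw [PySem.Dict.contains_eq_isSome_get?] at h
      cases hg : d.get? g
      · rw [hg] at h; simp at h
      · exact ⟨_, rfl⟩
    have hvals : vals ≠ [] := hne _ (PySem.Dict.mem_items_of_get?_eq_some d hv)
    have hd : d.getD g [] = vals := PySem.Dict.getD_of_get?_eq_some d [] hv
    have hc : (mapVals d).contains g = true := by rw [mapVals_contains]; exact h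
    show (let out1 := (mapVals d).setdefault g _
          let bucket := (out1.get? g).getD _
          let bucket := bucket.insert "min" (min (bucket.getD "min" 0) f)
          let bucket := bucket.insert "max" (max (bucket.getD "max" 0) f)
          let bucket := bucket.insert "count" (bucket.getD "count" 0 + 1)
          out1.insert g bucket) = _
    rw [PySem.Dict.setdefault_of_contains _ _ hc]
    simp only [mapVals_get?, hv, Option.map_some, Option.getD_some]
    show (mapVals d).insert g
        (PySem.Dict.mk [("min", min (minL vals) f), ("max", max (maxL vals) f),
                        ("count", (vals.length : Int) + 1)]) = _
    rw [hd, mapVals_insert, summary_append vals f hvals]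
  · -- new group
    simp only [Bool.not_eq_true] at h
    have hd : d.getD g [] = [] := PySem.Dict.getD_of_not_contains d [] h
    have hc : (mapVals d).contains g = false := by rw [mapVals_contains]; exact h
    show (let out1 := (mapVals d).setdefault g (PySem.Dict.ofList [("min", f), ("max", f), ("count", 0)])
          let bucket := (out1.get? g).getD _
          let bucket := bucket.insert "min" (min (bucket.getD "min" 0) f)
          let bucket := bucket.insert "max" (max (bucket.getD "max" 0) f)
          let bucket := bucket.insert "count" (bucket.getD "count" 0 + 1)
          out1.insert g bucket) = _
    rw [PySem.Dict.setdefault_of_not_contains _ _ hc]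
    simp only [PySem.Dict.get?_insert_self, Option.getD_some]
    show ((mapVals d).insert g _).insert g
        (PySem.Dict.mk [("min", min f f), ("max", max f f), ("count", (0 : Int) + 1)]) = _
    rw [PySem.Dict.insert_insert_self, hd, mapVals_insert]
    simp [summary, minL, maxL]

theorem stepB_ne (d : PySem.Dict String (List Int))
    (hne : ∀ p ∈ d.items, p.2 ≠ []) (r : String × Int × Int) :
    ∀ p ∈ (stepB d r).items, p.2 ≠ [] := by
  intro p hp
  have := (PySem.Dict.mem_items_insert _ _ _ _).mp hp
  rcases this with h | ⟨h, _⟩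
  · subst h; simp
  · exact hne _ h

theorem loop_inv (rows : List (String × Int × Int)) (d : PySem.Dict String (List Int))
    (hne : ∀ p ∈ d.items, p.2 ≠ []) :
    rows.foldl stepA (mapVals d) = mapVals (rows.foldl stepB d) := by
  induction rows generalizing d with
  | nil => rfl
  | cons r t ih =>
      show t.foldl stepA (stepA (mapVals d) r) = mapVals (t.foldl stepB (stepB d r))
      rw [step_eq d hne r]
      exact ih (stepB d r) (stepB_ne d hne r)

theorem foldl_stepB_ne (rows : List (String × Int × Int)) (d : PySem.Dict String (List Int))
    (hne : ∀ p ∈ d.items, p.2 ≠ []) :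
    ∀ p ∈ (rows.foldl stepB d).items, p.2 ≠ [] := by
  induction rows generalizing d with
  | nil => exact hne
  | cons r t ih => exact ih (stepB d r) (stepB_ne d hne r)

-- ===== VERDICT (by name: the statement is the Claim_ definition above) =====
theorem group_range_py_spec : Claim_equal_group_range_py := by
  intro rows _
  show group_range_py rows = group_range_py_alt rows
  have hinv := loop_inv rows PySem.Dict.empty (by intro p hp; cases hp)
  have hne := foldl_stepB_ne rows PySem.Dict.empty (by intro p hp; cases hp)
  show (rows.foldl stepA (mapVals PySem.Dict.empty)).items.map (fun p => (p.1, p.2.items)) = _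
  rw [hinv]
  show ((rows.foldl stepB PySem.Dict.empty).items.map (fun p => (p.1, summary p.2))).map
        (fun p => (p.1, p.2.items)) = _
  rw [List.map_map]
  apply List.map_congr_left
  intro p hp
  obtain ⟨x, t, hxt⟩ := List.exists_cons_of_ne_nil (hne p hp)
  simp only [Function.comp]
  show (p.1, (summary p.2).items) = _
  rw [hxt]
  simp [summary, minL, maxL, PySem.List.min?_id_cons, PySem.List.max?_id_cons]
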